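-- pv_equiv track=rewrite | github.com/westreed/ProgrammersAlgorithm | Programmers/Level3/주사위 고르기.py | compare_dice
-- ===== SOURCE A (Python) =====
-- def compare_dice(group1, group2):
--     # Group1을 기준
--     win = 0
--     for target_num in group1:
--         left = 0
--         right = len(group2)
--
--         while left+1 < right:
--             mid = (left+right) // 2
--             if target_num > group2[mid]:
--                 left = mid
--             else:
--                 right = mid
--
--         if target_num > group2[left]:
--             win += left+1
--
--     return win
-- ===== SOURCE B (Python) =====
-- def compare_dice(group1, group2):
--     # Same binary descent as A, but as a recursive divide-and-conquer helper,
--     # and the total expressed as a sum over group1 instead of an accumulator loop.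
--     def find(t, lo, hi):
--         if lo + 1 >= hi:
--             return lo
--         mid = (lo + hi) // 2
--         return find(t, mid, hi) if t > group2[mid] else find(t, lo, mid)
--
--     def wins(t):
--         lo = find(t, 0, len(group2))
--         return lo + 1 if t > group2[lo] else 0
--
--     return sum(wins(t) for t in group1)
-- ===== Notes on version B (the rewrite author's own statement) =====
-- stated objective: alternative
-- what changed: The inline while-loop binary descent becomes a recursive find(lo,hi) helper and the accumulator loop becomes a sum over a per-element wins() function.
-- outside the precondition, e.g. on compare_dice([1], []): A raises IndexError, B raises IndexError
import Mathlib
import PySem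

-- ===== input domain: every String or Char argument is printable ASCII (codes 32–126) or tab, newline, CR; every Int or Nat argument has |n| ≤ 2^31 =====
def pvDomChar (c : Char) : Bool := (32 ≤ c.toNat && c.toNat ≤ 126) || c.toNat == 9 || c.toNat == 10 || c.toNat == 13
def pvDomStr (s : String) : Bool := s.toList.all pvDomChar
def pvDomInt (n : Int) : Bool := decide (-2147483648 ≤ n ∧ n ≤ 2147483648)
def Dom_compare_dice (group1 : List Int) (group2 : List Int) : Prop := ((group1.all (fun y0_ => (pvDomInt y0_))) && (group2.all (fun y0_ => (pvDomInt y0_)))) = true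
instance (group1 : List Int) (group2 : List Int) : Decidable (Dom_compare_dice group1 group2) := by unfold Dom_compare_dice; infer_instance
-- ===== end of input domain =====

-- B replaces A's inline while-loop binary descent by a recursive find helper and the
-- accumulator loop by a sum over a per-element wins function (objective: alternative).

-- ===== PORT A =====
-- A's inner `while left+1 < right` loop, carried as a recursion on (left, right).
-- The Nat fuel only makes the recursion structural: starting from (right-left).toNat it
-- never runs out, since the interval shrinks by at least one each iteration.
def pvAWhile (group2 : List Int) (t : Int) : Nat → Int → Int → Int
  | 0, left, _ => left
  | fuel + 1, left, right =>
    if left + 1 < right then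
      let mid := PySem.Int.floordiv (left + right) 2
      if t > (PySem.List.pyGet? group2 mid).getD 0 then
        pvAWhile group2 t fuel mid right
      else
        pvAWhile group2 t fuel left mid
    else
      left

def compare_dice (group1 : List Int) (group2 : List Int) : Int :=
  group1.foldl (fun win t =>
    let left := pvAWhile group2 t group2.length 0 (group2.length : Int)
    if t > (PySem.List.pyGet? group2 left).getD 0 then win + (left + 1) else win) 0

-- ===== PORT B =====
-- B's recursive find(lo, hi); same fuel device to make the recursion structural.
def pvFind (group2 : List Int) (t : Int) : Nat → Int → Int → Int
  | 0, lo, _ => lo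
  | fuel + 1, lo, hi =>
    if lo + 1 ≥ hi then
      lo
    else
      let mid := PySem.Int.floordiv (lo + hi) 2
      if t > (PySem.List.pyGet? group2 mid).getD 0 then pvFind group2 t fuel mid hi
      else pvFind group2 t fuel lo mid

def pvWins (group2 : List Int) (t : Int) : Int :=
  let lo := pvFind group2 t group2.length 0 (group2.length : Int)
  if t > (PySem.List.pyGet? group2 lo).getD 0 then lo + 1 else 0

def compare_dice_alt (group1 : List Int) (group2 : List Int) : Int :=
  (group1.map (pvWins group2)).sum

-- ===== PRECONDITION & SPEC =====
-- Pre_ excludes exactly the inputs where A raises IndexError: group2 empty while group1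
-- is nonempty (A reads group2[left] for each element of group1); B raises there too.
def Pre_compare_dice (group1 : List Int) (group2 : List Int) : Prop :=
  group1 = [] ∨ group2 ≠ []
instance (group1 : List Int) (group2 : List Int) : Decidable (Pre_compare_dice group1 group2) := by
  unfold Pre_compare_dice; infer_instance

def pvWitness_compare_dice : List Int × List Int := ([1], [0])

def Spec_compare_dice (group1 : List Int) (group2 : List Int) (out : Int) : Prop :=
  out = compare_dice_alt group1 group2
instance (group1 : List Int) (group2 : List Int) (out : Int) : Decidable (Spec_compare_dice group1 group2 out) := by
  unfold Spec_compare_dice; infer_instance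

-- ===== CLAIM (what is proved, stated in full; the proofs are below) =====
def Claim_equal_compare_dice : Prop := ∀ (group1 : List Int) (group2 : List Int), Dom_compare_dice group1 group2 → Pre_compare_dice group1 group2 → Spec_compare_dice group1 group2 (compare_dice group1 group2)

-- ===== LEMMAS AND PROOFS =====
theorem pvAWhile_eq_pvFind (group2 : List Int) (t : Int) (fuel : Nat) (left right : Int) :
    pvAWhile group2 t fuel left right = pvFind group2 t fuel left right := by
  induction fuel generalizing left right with
  | zero => rfl
  | succ n ih =>
    rw [pvAWhile, pvFind]
    by_cases h : left + 1 < right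
    · rw [if_pos h, if_neg (show ¬ left + 1 ≥ right from by omega)]
      dsimp only
      split <;> exact ih _ _
    · rw [if_neg h, if_pos (show left + 1 ≥ right from by omega)]

theorem pvFoldl_wins (group2 : List Int) (l : List Int) (w : Int) :
    l.foldl (fun win t =>
      let left := pvAWhile group2 t group2.length 0 (group2.length : Int)
      if t > (PySem.List.pyGet? group2 left).getD 0 then win + (left + 1) else win) w
    = w + (l.map (pvWins group2)).sum := by
  induction l generalizing w with
  | nil => simp
  | cons x xs ih =>
    rw [List.foldl_cons, List.map_cons, List.sum_cons, ih]
    simp only [pvWins, pvAWhile_eq_pvFind]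
    split <;> ring

-- ===== VERDICT (by name: the statement is the Claim_ definition above) =====
theorem compare_dice_spec : Claim_equal_compare_dice := by
  intro group1 group2 _ _
  unfold Spec_compare_dice compare_dice compare_dice_alt
  simpa using pvFoldl_wins group2 group1 0
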